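-- pv_equiv track=rewrite | github.com/sudosys/school-works | COE308_pl_homeworks/Homework 1/hungarian_method_procedural.py | scan_columns
-- ===== SOURCE A (Python) =====
-- import copy, time, os, psutil
--
-- def transpose_matrix(matrix):
--
--     transposed = [[matrix[j][i] for j in range(len(matrix))] for i in range(len(matrix[0]))]
--
--     return transposed
--
-- def remove_column(matrix, column_index):
--
--     modified_matrix = []
--
--     for row in matrix:
--         row[column_index] = -1
--         modified_matrix.append(row)
--
--     return modified_matrix
--
-- def scan_rows(matrix):
--
--     inside_copy_matrix = copy.deepcopy(matrix)
--
--     removed_rows = []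
--     marked_indices = []
--
--     for row_index in range(len(inside_copy_matrix)):
--
--         row = inside_copy_matrix[row_index]
--
--         if row.count(0) > 1:
--             continue
--
--         try:
--             index = row.index(0)
--             marked_indices.append((row_index, index))
--             removed_rows.append(index)
--             inside_copy_matrix = remove_column(inside_copy_matrix, index)
--         except Exception:
--             continue
--
--     return inside_copy_matrix, removed_rows, marked_indices
--
-- def scan_columns(matrix):
--
--     transposed_matrix = transpose_matrix(matrix)
--
--     scanned_columns, removed_columns, marked_indices = scan_rows(transposed_matrix)
--
--     original_matrix = transpose_matrix(scanned_columns)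
--
--     reverse_marked_indices = []
--
--     for index in marked_indices:
--         reverse_marked_indices.append((index[1], index[0]))
--
--     return original_matrix, removed_columns, reverse_marked_indices
-- ===== SOURCE B (Python) =====
-- def scan_columns(matrix):
--     n = len(matrix)
--     m = len(matrix[0])
--     # index the zeros once: per-column zero-row lists, per-row zero-column lists
--     zrows = [[i for i in range(n) if matrix[i][j] == 0] for j in range(m)]
--     zcols = [[j for j in range(m) if matrix[i][j] == 0] for i in range(n)]
--     count = [len(z) for z in zrows]        # live zeros per column, kept incrementally
--     alive = [True] * n
--     removed_rows = []
--     marks = []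
--     for j in range(m):
--         if count[j] == 1:
--             i = next(i for i in zrows[j] if alive[i])
--             alive[i] = False
--             removed_rows.append(i)
--             marks.append((i, j))
--             for jj in zcols[i]:
--                 count[jj] -= 1
--     result = [row[:m] if alive[i] else [-1] * m for i, row in enumerate(matrix)]
--     return result, removed_rows, marks
-- ===== Notes on version B (the rewrite author's own statement) =====
-- stated objective: faster
-- what changed: B never transposes, deepcopies or blanks columns: it indexes the zeros once (per-column zero-row lists and per-row zero-column lists), keeps a live-zero counter per column that is decremented incrementally when a row is claimed, and rebuilds the output matrix once at the end, so no column is ever rescanned.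
import Mathlib
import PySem

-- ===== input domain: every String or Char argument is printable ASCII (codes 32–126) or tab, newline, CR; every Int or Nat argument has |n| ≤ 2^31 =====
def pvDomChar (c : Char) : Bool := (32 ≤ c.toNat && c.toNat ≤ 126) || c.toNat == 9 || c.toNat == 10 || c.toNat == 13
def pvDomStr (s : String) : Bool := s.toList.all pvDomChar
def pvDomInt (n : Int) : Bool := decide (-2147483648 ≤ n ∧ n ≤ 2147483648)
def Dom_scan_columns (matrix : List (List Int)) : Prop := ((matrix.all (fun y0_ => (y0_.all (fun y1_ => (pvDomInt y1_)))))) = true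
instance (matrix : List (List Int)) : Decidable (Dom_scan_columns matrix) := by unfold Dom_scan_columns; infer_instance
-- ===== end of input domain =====

-- B replaces A's transpose / deepcopy / per-column rescans with a one-time zero index
-- (per-column zero rows, per-row zero columns) and incrementally maintained live-zero
-- counters, rebuilding the output matrix once at the end (objective: faster, by a constant
-- factor; equivalence proved on Pre_: nonempty matrix whose rows all have at
-- least len(matrix[0]) > 0 entries — exactly the inputs where A returns).


-- ===== PORT A =====
-- `matrix[0]` raises on an empty list: `headD []` is exact on Pre_ (matrix nonempty);
-- `matrix[j][i]` raises on a too-short row: `pyGetD … 0` is exact on Pre_ (all rows ≥ len(matrix[0])).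
def transpose_matrix (matrix : List (List Int)) : List (List Int) :=
  (PySem.List.pyRange 0 ((matrix.headD []).length : Int)).map (fun i =>
    (PySem.List.pyRange 0 (matrix.length : Int)).map (fun j =>
      PySem.List.pyGetD (PySem.List.pyGetD matrix j []) i 0))

-- `row[column_index] = -1` : column_index always comes from `row.index(0)`, hence in range,
-- so `List.set` is exact.
def remove_column (matrix : List (List Int)) (column_index : Nat) : List (List Int) :=
  matrix.map (fun row => row.set column_index (-1))

def scan_rows_step (st : List (List Int) × List Int × List (Int × Int)) (row_index : Int) :
    List (List Int) × List Int × List (Int × Int) :=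
  let row := PySem.List.pyGetD st.1 row_index []
  if PySem.List.count row 0 > 1 then st
  else
    match PySem.List.index? row 0 with
    | none => st                        -- row.index(0) raised ValueError → except: continue
    | some index =>
        (remove_column st.1 index, st.2.1 ++ [(index : Int)], st.2.2 ++ [(row_index, (index : Int))])

def scan_rows (matrix : List (List Int)) : List (List Int) × List Int × List (Int × Int) :=
  (PySem.List.pyRange 0 (matrix.length : Int)).foldl scan_rows_step (matrix, [], [])

def scan_columns (matrix : List (List Int)) : List (List Int) × List Int × (List (Int × Int)) :=
  let transposed := transpose_matrix matrix
  let res := scan_rows transposed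
  (transpose_matrix res.1, res.2.1, res.2.2.map (fun p => (p.2, p.1)))

-- ===== PORT B =====
-- loop body of Source B's single pass over columns; `next(i for i in zrows[j] if alive[i])`:
-- count[j] == 1 guarantees exactly one live zero, so find?.getD's default is never used;
-- `alive[i]` / `count[j]` via getD are exact (indices produced by range(n)/range(m)).
def scan_columns_step (zrows zcols : List (List Nat))
    (st : List Int × List Bool × List Int × List (Int × Int)) (j : Nat) :
    List Int × List Bool × List Int × List (Int × Int) :=
  if st.1.getD j 0 = 1 then
    let i := ((zrows.getD j []).find? (fun i => st.2.1.getD i false)).getD 0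
    ((zcols.getD i []).foldl (fun c jj => c.set jj (c.getD jj 0 - 1)) st.1,
     st.2.1.set i false,
     st.2.2.1 ++ [(i : Int)],
     st.2.2.2 ++ [((i : Int), (j : Int))])
  else st

-- `matrix[i][j]` via getD is exact on Pre_ (every row has ≥ m entries); `row[:m]` = take m.
def scan_columns_alt (matrix : List (List Int)) : List (List Int) × List Int × (List (Int × Int)) :=
  let n := matrix.length
  let m := (matrix.headD []).length
  let zrows := (List.range m).map (fun j =>
    (List.range n).filter (fun i => (matrix.getD i []).getD j 0 == 0))
  let zcols := (List.range n).map (fun i =>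
    (List.range m).filter (fun j => (matrix.getD i []).getD j 0 == 0))
  let st := (List.range m).foldl (scan_columns_step zrows zcols)
    (zrows.map (fun z => (z.length : Int)), List.replicate n true, [], [])
  ((PySem.List.enumerate matrix).map (fun p =>
      if st.2.1.getD p.1.toNat false then p.2.take m else List.replicate m (-1)),
   st.2.2.1, st.2.2.2)

-- ===== PRECONDITION & SPEC =====
-- Pre_ = exactly the inputs on which A returns: A raises IndexError whenever the matrix is
-- empty, its first row is empty, or some row is shorter than the first row (both transposes
-- index matrix[j][i] for i < len(matrix[0])).
def Pre_scan_columns (matrix : List (List Int)) : Prop :=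
  0 < (matrix.headD []).length ∧ ∀ row ∈ matrix, (matrix.headD []).length ≤ row.length

instance (matrix : List (List Int)) : Decidable (Pre_scan_columns matrix) := by
  unfold Pre_scan_columns; infer_instance

def pvWitness_scan_columns : List (List Int) := [[0, 1, 2], [3, 0, 0], [4, 5, 0]]

def Spec_scan_columns (matrix : List (List Int)) (out : List (List Int) × List Int × (List (Int × Int))) : Prop := out = scan_columns_alt matrix
instance (matrix : List (List Int)) (out : List (List Int) × List Int × (List (Int × Int))) : Decidable (Spec_scan_columns matrix out) := by unfold Spec_scan_columns; infer_instance

-- ===== CLAIM (what is proved, stated in full; the proofs are below) =====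
def Claim_equal_scan_columns : Prop := ∀ (matrix : List (List Int)), Dom_scan_columns matrix → Pre_scan_columns matrix → Spec_scan_columns matrix (scan_columns matrix)

-- ===== LEMMAS AND PROOFS =====

-- the matrix A's scan state always has: transpose of `matrix`, with every row index in R blanked to -1
def maskM (matrix : List (List Int)) (R : List Nat) : List (List Int) :=
  (List.range (matrix.headD []).length).map (fun c =>
    (List.range matrix.length).map (fun r =>
      if r ∈ R then -1 else (matrix.getD r []).getD c 0))

def castL (R : List Nat) : List Int := R.map (fun r => (r : Int))

-- abstract descriptions of B's loop state
def zeroAt (matrix : List (List Int)) (i j : Nat) : Bool := (matrix.getD i []).getD j 0 == 0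

def zerosF (matrix : List (List Int)) (R : List Nat) (j : Nat) : List Nat :=
  (List.range matrix.length).filter (fun i => !decide (i ∈ R) && zeroAt matrix i j)

def aliveOf (n : Nat) (R : List Nat) : List Bool := (List.range n).map (fun i => !decide (i ∈ R))

def countOf (matrix : List (List Int)) (R : List Nat) : List Int :=
  (List.range (matrix.headD []).length).map (fun j => ((zerosF matrix R j).length : Int))

def zrowsD (matrix : List (List Int)) : List (List Nat) :=
  (List.range (matrix.headD []).length).map (fun j =>
    (List.range matrix.length).filter (fun i => (matrix.getD i []).getD j 0 == 0))

def zcolsD (matrix : List (List Int)) : List (List Nat) :=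
  (List.range matrix.length).map (fun i =>
    (List.range (matrix.headD []).length).filter (fun j => (matrix.getD i []).getD j 0 == 0))

lemma alt_unfold (matrix : List (List Int)) :
    scan_columns_alt matrix =
      (let st := (List.range (matrix.headD []).length).foldl
          (scan_columns_step (zrowsD matrix) (zcolsD matrix))
          ((zrowsD matrix).map (fun z => (z.length : Int)),
           List.replicate matrix.length true, [], [])
       ((PySem.List.enumerate matrix).map (fun p =>
          if st.2.1.getD p.1.toNat false then p.2.take (matrix.headD []).length
          else List.replicate (matrix.headD []).length (-1)),
        st.2.2.1, st.2.2.2)) := rfl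

lemma transpose_eq_mask (matrix : List (List Int)) :
    transpose_matrix matrix = maskM matrix [] := by
  simp [transpose_matrix, maskM, PySem.List.pyRange_zero_natCast, List.map_map,
        Function.comp_def, PySem.List.pyGetD_natCast]

lemma remove_column_mask (matrix : List (List Int)) (R : List Nat) (r0 : Nat) :
    remove_column (maskM matrix R) r0 = maskM matrix (R ++ [r0]) := by
  unfold remove_column maskM
  rw [List.map_map]
  refine List.map_congr_left (fun c _ => ?_)
  simp only [Function.comp_apply]
  refine List.ext_getElem (by simp) (fun i h1 h2 => ?_)
  simp only [List.length_set, List.length_map, List.length_range] at h1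
  rw [List.getElem_set]
  simp only [List.getElem_map, List.getElem_range, List.mem_append, List.mem_singleton]
  by_cases hi : r0 = i
  · subst hi; simp
  · rw [if_neg hi]
    have hne : ¬ i = r0 := fun hh => hi hh.symm
    by_cases hR : i ∈ R
    · simp [hR]
    · simp [hR, hne]

lemma mask_row (matrix : List (List Int)) (R : List Nat) (j : Nat)
    (hj : j < (matrix.headD []).length) :
    PySem.List.pyGetD (maskM matrix R) (j : Int) [] =
      (List.range matrix.length).map (fun r =>
        if r ∈ R then -1 else (matrix.getD r []).getD j 0) := by
  rw [PySem.List.pyGetD_natCast]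
  exact PySem.List.getD_map_range _ _ _ _ hj

lemma count_map_range (g : Nat → Int) (n : Nat) :
    PySem.List.count ((List.range n).map g) 0 =
      ((List.range n).filter (fun i => g i == 0)).length := by
  simp [PySem.List.count, List.count_eq_countP, List.countP_eq_length_filter,
        List.filter_map, Function.comp_def]

lemma findIdx?_range' (p : Nat → Bool) : ∀ (n s : Nat),
    List.findIdx? p (List.range' s n) =
      (List.find? p (List.range' s n)).map (fun x => x - s) := by
  intro n
  induction n with
  | zero => intro s; simp
  | succ n ih =>
    intro s
    rw [List.range'_succ]
    rw [List.findIdx?_cons, List.find?_cons]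
    cases hp : p s with
    | true => simp
    | false =>
      simp only [Bool.false_eq_true, if_false]
      rw [ih (s + 1)]
      cases hf : List.find? p (List.range' (s + 1) n) with
      | none => simp
      | some x =>
        have hx : x ∈ List.range' (s + 1) n := List.mem_of_find?_eq_some hf
        have hx' : s + 1 ≤ x := (List.mem_range'_1.mp hx).1
        simp only [Option.map_some]
        congr 1
        omega

lemma index?_map_range (g : Nat → Int) (n : Nat) :
    PySem.List.index? ((List.range n).map g) 0 =
      ((List.range n).filter (fun i => g i == 0)).head? := by
  show List.idxOf? 0 ((List.range n).map g) = _
  rw [List.idxOf?, List.findIdx?_map,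
      show ((fun x => x == (0 : Int)) ∘ g) = (fun i : Nat => g i == 0) from rfl,
      List.head?_filter, List.range_eq_range', findIdx?_range']
  cases List.find? (fun i : Nat => g i == 0) (List.range' 0 n) <;> simp

lemma enumerate_aux (xs : List (List Int)) : ∀ (s : Int),
    PySem.List.enumerate xs s =
      (List.range xs.length).map (fun (i : Nat) => (s + (i : Int), xs.getD i [])) := by
  induction xs with
  | nil => intro s; simp [PySem.List.enumerate]
  | cons x xs ih =>
    intro s
    rw [show PySem.List.enumerate (x :: xs) s = (s, x) :: PySem.List.enumerate xs (s + 1) from rfl]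
    rw [ih (s + 1), List.length_cons, List.range_succ_eq_map, List.map_cons, List.map_map]
    simp only [List.getD_cons_zero, Nat.cast_zero, add_zero]
    congr 1
    refine List.map_congr_left (fun i _ => ?_)
    simp only [Function.comp_apply, Nat.succ_eq_add_one, List.getD_cons_succ]
    congr 1
    push_cast
    ring

lemma enumerate_eq (matrix : List (List Int)) :
    PySem.List.enumerate matrix =
      (List.range matrix.length).map (fun (i : Nat) => ((i : Int), matrix.getD i [])) := by
  rw [show PySem.List.enumerate matrix = PySem.List.enumerate matrix 0 from rfl, enumerate_aux]
  refine List.map_congr_left (fun i _ => ?_)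
  simp

lemma castL_append (xs ys : List Nat) : castL (xs ++ ys) = castL xs ++ castL ys := by
  simp [castL]

-- getD of a map over range, generic
lemma getD_map_range' {α : Type} (f : Nat → α) (n j : Nat) (d : α) (hj : j < n) :
    ((List.range n).map f).getD j d = f j := by
  rw [List.getD_eq_getElem _ _ (by simpa using hj), List.getElem_map, List.getElem_range]

lemma aliveOf_getD (n : Nat) (R : List Nat) (i : Nat) (hi : i < n) :
    (aliveOf n R).getD i false = !decide (i ∈ R) :=
  getD_map_range' _ _ _ _ hi

lemma aliveOf_set (n : Nat) (R : List Nat) (i0 : Nat) :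
    (aliveOf n R).set i0 false = aliveOf n (R ++ [i0]) := by
  unfold aliveOf
  refine List.ext_getElem (by simp) (fun i h1 h2 => ?_)
  simp only [List.length_set, List.length_map, List.length_range] at h1
  rw [List.getElem_set]
  simp only [List.getElem_map, List.getElem_range, List.mem_append, List.mem_singleton]
  by_cases hi : i0 = i
  · subst hi; simp
  · rw [if_neg hi]
    have hne : ¬ i = i0 := fun hh => hi hh.symm
    by_cases hR : i ∈ R
    · simp [hR]
    · simp [hR, hne]

-- length/getD of the decrementing foldl
lemma foldl_dec_length (L : List Nat) (c : List Int) :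
    (L.foldl (fun c jj => c.set jj (c.getD jj 0 - 1)) c).length = c.length := by
  induction L generalizing c with
  | nil => rfl
  | cons a L ih => rw [List.foldl_cons, ih, List.length_set]

lemma foldl_dec_getD (j : Nat) : ∀ (L : List Nat), L.Nodup → ∀ (c : List Int), j < c.length →
    (L.foldl (fun c jj => c.set jj (c.getD jj 0 - 1)) c).getD j 0 =
      c.getD j 0 - (if j ∈ L then 1 else 0) := by
  intro L
  induction L with
  | nil => intro _ c _; simp
  | cons a L ih =>
    intro hnd c hj
    rw [List.foldl_cons]
    have hnd' := hnd
    rw [List.nodup_cons] at hnd'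
    rw [ih hnd'.2 _ (by simpa using hj)]
    by_cases ha : j = a
    · subst ha
      have hjL : j ∉ L := hnd'.1
      rw [List.getD_eq_getElem _ _ (by simpa [List.length_set] using hj), List.getElem_set,
          if_pos rfl]
      rw [List.getD_eq_getElem _ _ hj]
      simp [hjL]
    · have : (c.set a (c.getD a 0 - 1)).getD j 0 = c.getD j 0 := by
        rw [List.getD_eq_getElem _ _ (by simpa [List.length_set] using hj), List.getElem_set,
            if_neg (fun h => ha h.symm), List.getD_eq_getElem _ _ hj]
      rw [this]
      simp [List.mem_cons, ha]

lemma zerosF_length_append (matrix : List (List Int)) (R : List Nat) (i0 j : Nat)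
    (hi0n : i0 < matrix.length) (hi0R : i0 ∉ R) :
    (zerosF matrix R j).length =
      (zerosF matrix (R ++ [i0]) j).length + (if zeroAt matrix i0 j then 1 else 0) := by
  unfold zerosF
  have hflt : (List.range matrix.length).filter
      (fun i => !decide (i ∈ R ++ [i0]) && zeroAt matrix i j) =
      ((List.range matrix.length).filter (fun i => !decide (i ∈ R) && zeroAt matrix i j)).filter
        (fun i => i != i0) := by
    rw [List.filter_filter]
    refine List.filter_congr (fun i _ => ?_)
    by_cases hii : i = i0
    · subst hii; simp
    · by_cases hR : i ∈ R <;> simp [hR, hii]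
  rw [hflt]
  set Z := (List.range matrix.length).filter (fun i => !decide (i ∈ R) && zeroAt matrix i j) with hZ
  have hZnd : Z.Nodup := List.Nodup.filter _ (List.nodup_range)
  have hmem : i0 ∈ Z ↔ zeroAt matrix i0 j = true := by
    rw [hZ, List.mem_filter, List.mem_range]
    simp [hi0n, hi0R]
  rw [← List.Nodup.erase_eq_filter hZnd i0]
  by_cases hz : zeroAt matrix i0 j
  · rw [if_pos hz, List.length_erase_of_mem (hmem.mpr hz)]
    have : 0 < Z.length := List.length_pos_of_mem (hmem.mpr hz)
    omega
  · rw [if_neg hz, List.erase_of_not_mem (fun h => hz (hmem.mp h))]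
    omega

lemma mem_zcolsD_getD (matrix : List (List Int)) (i0 j : Nat) (hi0 : i0 < matrix.length)
    (hj : j < (matrix.headD []).length) :
    (j ∈ (zcolsD matrix).getD i0 []) ↔ zeroAt matrix i0 j = true := by
  unfold zcolsD
  rw [getD_map_range' _ _ _ _ hi0, List.mem_filter, List.mem_range]
  unfold zeroAt
  exact ⟨fun h => h.2, fun h => ⟨hj, h⟩⟩

lemma countOf_update (matrix : List (List Int)) (R : List Nat) (i0 : Nat)
    (hi0n : i0 < matrix.length) (hi0R : i0 ∉ R) :
    ((zcolsD matrix).getD i0 []).foldl (fun c jj => c.set jj (c.getD jj 0 - 1))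
        (countOf matrix R) = countOf matrix (R ++ [i0]) := by
  have hnd : ((zcolsD matrix).getD i0 []).Nodup := by
    unfold zcolsD
    rw [getD_map_range' _ _ _ _ hi0n]
    exact List.Nodup.filter _ List.nodup_range
  have hlen : (countOf matrix R).length = (matrix.headD []).length := by
    simp [countOf]
  refine List.ext_getElem ?_ (fun j h1 h2 => ?_)
  · rw [foldl_dec_length, hlen]; simp [countOf]
  · rw [foldl_dec_length, hlen] at h1
    have hD : (((zcolsD matrix).getD i0 []).foldl (fun c jj => c.set jj (c.getD jj 0 - 1))
        (countOf matrix R)).getD j 0 =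
        (countOf matrix R).getD j 0 - (if j ∈ (zcolsD matrix).getD i0 [] then 1 else 0) :=
      foldl_dec_getD j _ hnd _ (by rw [hlen]; exact h1)
    rw [← List.getD_eq_getElem _ 0, hD, ← List.getD_eq_getElem _ 0]
    unfold countOf
    rw [getD_map_range' _ _ _ _ h1, getD_map_range' _ _ _ _ h1]
    have hL := zerosF_length_append matrix R i0 j hi0n hi0R
    have hm := (mem_zcolsD_getD matrix i0 j hi0n h1)
    by_cases hz : zeroAt matrix i0 j
    · rw [if_pos (hm.mpr hz)]
      rw [if_pos hz] at hL
      rw [hL]; push_cast; ring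
    · rw [if_neg (fun h => hz (hm.mp h))]
      rw [if_neg hz] at hL
      rw [hL]; push_cast; ring

lemma find?_filter_head? {α : Type} (p q : α → Bool) (L : List α) :
    (L.filter q).find? p = (L.filter (fun x => q x && p x)).head? := by
  rw [← List.head?_filter, List.filter_filter]
  exact congrArg List.head? (List.filter_congr (fun x _ => Bool.and_comm _ _))

lemma find?_alive (n : Nat) (R : List Nat) (L : List Nat) (hL : ∀ x ∈ L, x < n) :
    L.find? (fun i => (aliveOf n R).getD i false) = L.find? (fun i => !decide (i ∈ R)) := by
  induction L with
  | nil => rfl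
  | cons a L ih =>
    rw [List.find?_cons, List.find?_cons, aliveOf_getD n R a (hL a (List.mem_cons_self))]
    cases h : !decide (a ∈ R) with
    | true => rfl
    | false => exact ih (fun x hx => hL x (List.mem_cons_of_mem _ hx))

-- B's loop body applied to the abstract state
lemma stepB_eval (matrix : List (List Int)) (R : List Nat) (marks : List (Int × Int)) (k : Nat)
    (hk : k < (matrix.headD []).length) :
    scan_columns_step (zrowsD matrix) (zcolsD matrix)
        (countOf matrix R, aliveOf matrix.length R, castL R, marks) k =
      (if ((zerosF matrix R k).length : Int) = 1 then
        (((zcolsD matrix).getD (((zerosF matrix R k).head?).getD 0) []).foldl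
            (fun c jj => c.set jj (c.getD jj 0 - 1)) (countOf matrix R),
         (aliveOf matrix.length R).set (((zerosF matrix R k).head?).getD 0) false,
         castL R ++ [((((zerosF matrix R k).head?).getD 0 : Nat) : Int)],
         marks ++ [(((((zerosF matrix R k).head?).getD 0 : Nat) : Int), (k : Int))])
       else (countOf matrix R, aliveOf matrix.length R, castL R, marks)) := by
  unfold scan_columns_step
  have hguard : (countOf matrix R).getD k 0 = ((zerosF matrix R k).length : Int) := by
    unfold countOf; exact getD_map_range' _ _ _ _ hk
  have hzr : (zrowsD matrix).getD k [] =
      (List.range matrix.length).filter (fun i => (matrix.getD i []).getD k 0 == 0) := by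
    unfold zrowsD; exact getD_map_range' _ _ _ _ hk
  have hfind : ((zrowsD matrix).getD k []).find? (fun i => (aliveOf matrix.length R).getD i false)
      = (zerosF matrix R k).head? := by
    rw [hzr, find?_alive matrix.length R _ (fun x hx => by
      have := List.mem_range.mp (List.mem_filter.mp hx).1; exact this)]
    rw [find?_filter_head?]
    unfold zerosF zeroAt
    congr 1
    exact List.filter_congr (fun i _ => Bool.and_comm _ _)
  simp only [hguard, hfind]

lemma loop_inv (matrix : List (List Int)) :
    ∀ k, k ≤ (matrix.headD []).length →
    ∃ (R : List Nat) (marks : List (Int × Int)),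
      (∀ r ∈ R, r < matrix.length) ∧
      (List.range k).foldl (fun st (j : Nat) => scan_rows_step st (j : Int))
          (maskM matrix [], [], []) = (maskM matrix R, castL R, marks) ∧
      (List.range k).foldl (scan_columns_step (zrowsD matrix) (zcolsD matrix))
          (countOf matrix [], aliveOf matrix.length [], [], []) =
        (countOf matrix R, aliveOf matrix.length R, castL R, marks.map (fun p => (p.2, p.1))) := by
  intro k
  induction k with
  | zero =>
    intro _
    exact ⟨[], [], by simp, by simp [castL], by simp [castL]⟩
  | succ k ih =>
    intro hk
    obtain ⟨R, marks, hRlt, hA, hB⟩ := ih (Nat.le_of_succ_le hk)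
    have hkM : k < (matrix.headD []).length := hk
    rw [List.range_succ, List.foldl_append, List.foldl_append, hA, hB,
        List.foldl_cons, List.foldl_cons, List.foldl_nil, List.foldl_nil]
    have hrowk : PySem.List.pyGetD (maskM matrix R) ((k : Nat) : Int) [] =
        (List.range matrix.length).map
          (fun r => if r ∈ R then -1 else (matrix.getD r []).getD k 0) := mask_row matrix R k hkM
    have hfilter : zerosF matrix R k =
        (List.range matrix.length).filter
          (fun i => (if i ∈ R then -1 else (matrix.getD i []).getD k 0) == 0) := by
      unfold zerosF zeroAt
      refine List.filter_congr (fun i _ => ?_)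
      by_cases h : i ∈ R
      · simp [h]
      · simp [h]
    rw [stepB_eval matrix R _ k hkM]
    cases hZ : (List.range matrix.length).filter
        (fun i => (if i ∈ R then -1 else (matrix.getD i []).getD k 0) == 0) with
    | nil =>
      refine ⟨R, marks, hRlt, ?_, ?_⟩
      · unfold scan_rows_step
        simp only [hrowk]
        rw [count_map_range, index?_map_range, hZ]
        rfl
      · rw [if_neg (by rw [hfilter, hZ]; simp)]
    | cons i0 tl =>
      cases tl with
      | nil =>
        have hmem : i0 ∈ (List.range matrix.length).filter
            (fun i => (if i ∈ R then -1 else (matrix.getD i []).getD k 0) == 0) := by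
          rw [hZ]; exact List.mem_singleton.mpr rfl
        have hi0n : i0 < matrix.length := List.mem_range.mp (List.mem_filter.mp hmem).1
        have hi0 : ((if i0 ∈ R then -1 else (matrix.getD i0 []).getD k 0) == 0) = true :=
          (List.mem_filter.mp hmem).2
        have hnotR : i0 ∉ R := by
          intro h
          simp [h] at hi0
        refine ⟨R ++ [i0], marks ++ [(((k : Nat) : Int), (i0 : Int))], ?_, ?_, ?_⟩
        · intro r hr
          rcases List.mem_append.mp hr with h | h
          · exact hRlt r h
          · rw [List.mem_singleton.mp h]; exact hi0n
        · unfold scan_rows_step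
          simp only [hrowk]
          rw [count_map_range, index?_map_range, hZ]
          show (remove_column (maskM matrix R) i0, castL R ++ [((i0 : Nat) : Int)],
                marks ++ [(((k : Nat) : Int), ((i0 : Nat) : Int))]) = _
          rw [remove_column_mask matrix R i0, castL_append]
          rfl
        · rw [if_pos (by rw [hfilter, hZ]; simp)]
          have hhead : ((zerosF matrix R k).head?).getD 0 = i0 := by
            rw [hfilter, hZ]; rfl
          rw [hhead, countOf_update matrix R i0 hi0n hnotR, aliveOf_set, castL_append,
              List.map_append]
          rfl
      | cons b l =>
        refine ⟨R, marks, hRlt, ?_, ?_⟩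
        · unfold scan_rows_step
          simp only [hrowk]
          rw [count_map_range, index?_map_range, hZ]
          rw [if_pos (by simp)]
        · rw [if_neg (by rw [hfilter, hZ]; simp; omega)]

lemma countOf_nil_eq (matrix : List (List Int)) :
    (zrowsD matrix).map (fun z => (z.length : Int)) = countOf matrix [] := by
  unfold zrowsD countOf zerosF zeroAt
  rw [List.map_map]
  refine List.map_congr_left (fun j _ => ?_)
  simp

lemma aliveOf_nil_eq (matrix : List (List Int)) :
    List.replicate matrix.length true = aliveOf matrix.length [] := by
  unfold aliveOf
  simp

lemma final_matrix (matrix : List (List Int)) (R : List Nat)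
    (hm : 0 < (matrix.headD []).length)
    (hrow : ∀ row ∈ matrix, (matrix.headD []).length ≤ row.length) :
    transpose_matrix (maskM matrix R) =
      (List.range matrix.length).map (fun i =>
        if i ∈ R then List.replicate (matrix.headD []).length (-1)
        else (matrix.getD i []).take (matrix.headD []).length) := by
  have hlen : (maskM matrix R).length = (matrix.headD []).length := by simp [maskM]
  have hhead : (maskM matrix R).headD [] =
      (List.range matrix.length).map (fun r =>
        if r ∈ R then -1 else (matrix.getD r []).getD 0 0) := by
    unfold maskM
    obtain ⟨m', hm'⟩ := Nat.exists_eq_add_of_lt hm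
    rw [hm']
    simp [List.range_succ_eq_map]
  unfold transpose_matrix
  rw [hhead, hlen]
  simp only [List.length_map, List.length_range]
  rw [PySem.List.pyRange_zero_natCast, PySem.List.pyRange_zero_natCast]
  simp only [List.map_map]
  refine List.map_congr_left (fun i hi => ?_)
  have hin : i < matrix.length := List.mem_range.mp hi
  simp only [Function.comp_apply]
  have hentry : ∀ j : Nat, j < (matrix.headD []).length →
      PySem.List.pyGetD (PySem.List.pyGetD (maskM matrix R) ((j : Nat) : Int) []) ((i : Nat) : Int) 0 =
        if i ∈ R then -1 else (matrix.getD i []).getD j 0 := by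
    intro j hj
    rw [mask_row matrix R j hj, PySem.List.pyGetD_natCast]
    exact PySem.List.getD_map_range _ _ _ _ hin
  have hrlen : (matrix.headD []).length ≤ (matrix.getD i []).length := by
    apply hrow
    rw [List.getD_eq_getElem _ _ hin]
    exact List.getElem_mem hin
  by_cases hR : i ∈ R
  · rw [if_pos hR]
    refine List.eq_replicate_iff.mpr ⟨by simp, fun b hb => ?_⟩
    obtain ⟨j, hj, rfl⟩ := List.mem_map.mp hb
    simp only [Function.comp_apply]
    rw [hentry j (List.mem_range.mp hj), if_pos hR]
  · rw [if_neg hR]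
    refine List.ext_getElem
      (by simp only [List.length_map, List.length_range, List.length_take]; omega)
      (fun j h1 h2 => ?_)
    simp only [List.length_map, List.length_range] at h1
    rw [List.getElem_map, List.getElem_range]
    simp only [Function.comp_apply]
    rw [hentry j h1, if_neg hR, List.getElem_take,
        List.getD_eq_getElem _ _ (by omega)]

-- ===== VERDICT =====
theorem scan_columns_spec : Claim_equal_scan_columns := by
  intro matrix _ hPre
  obtain ⟨hm, hrow⟩ := hPre
  unfold Spec_scan_columns
  obtain ⟨R, marks, hRlt, hA, hB⟩ := loop_inv matrix (matrix.headD []).length le_rfl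
  -- A's side
  have hAres : scan_rows (transpose_matrix matrix) = (maskM matrix R, castL R, marks) := by
    unfold scan_rows
    rw [transpose_eq_mask]
    have hlen : ((maskM matrix [] : List (List Int)).length : Int) =
        (((matrix.headD []).length : Nat) : Int) := by simp [maskM]
    rw [hlen, PySem.List.pyRange_zero_natCast, List.foldl_map]
    exact hA
  have hAval : scan_columns matrix =
      (transpose_matrix (maskM matrix R), castL R, marks.map (fun p => (p.2, p.1))) := by
    show (transpose_matrix (scan_rows (transpose_matrix matrix)).1,
          (scan_rows (transpose_matrix matrix)).2.1,
          (scan_rows (transpose_matrix matrix)).2.2.map (fun p => (p.2, p.1))) = _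
    rw [hAres]
  -- B's side
  have hBval : scan_columns_alt matrix =
      ((PySem.List.enumerate matrix).map (fun p =>
          if (aliveOf matrix.length R).getD p.1.toNat false then
            p.2.take (matrix.headD []).length
          else List.replicate (matrix.headD []).length (-1)),
       castL R, marks.map (fun p => (p.2, p.1))) := by
    rw [alt_unfold, countOf_nil_eq, aliveOf_nil_eq, hB]
  -- the two result matrices agree
  have hfin : transpose_matrix (maskM matrix R) =
      (PySem.List.enumerate matrix).map (fun p =>
        if (aliveOf matrix.length R).getD p.1.toNat false then
          p.2.take (matrix.headD []).length
        else List.replicate (matrix.headD []).length (-1)) := by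
    rw [final_matrix matrix R hm hrow, enumerate_eq, List.map_map]
    refine List.map_congr_left (fun i hi => ?_)
    have hin : i < matrix.length := List.mem_range.mp hi
    simp only [Function.comp_apply, Int.toNat_natCast]
    rw [aliveOf_getD _ _ _ hin]
    by_cases hR : i ∈ R
    · simp [hR]
    · simp [hR]
  rw [hAval, hBval, hfin]
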